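-- pv_equiv track=rewrite | github.com/bineeshpc/technical_docs | hackerrank/elevator_travel.py | solve
-- ===== SOURCE A (Python) =====
-- def get_distance(p, i):
--     d = 0
--     if i >= len(p):
--         return d
--
--     if i - 1 >= 0:
--         d += abs(p[i-1] - p[i])
--     else:
--         d += p[i]
--
--     return d
--
-- def swap(p, i, j):
--     temp = p[i]
--     p[i] = p[j]
--     p[j] = temp
--
-- def solve(p):
--     # Write your code here
--     n = len(p)
--     # find the present distance
--     def get_total_distance(p):
--         total_distance = 0
--         for i in range(n):
--
--             total_distance += get_distance(p, i)
--
--         return total_distance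
--
--     def position_distance(p, i):
--         # left distance + right distance
--         # left distance
--         left_distance = get_distance(p, i)
--         right_distance = get_distance(p, i+1)
--         return left_distance + right_distance
--
--     p_distance = [position_distance(p, i) for i in range(n)]
--     total_distance = get_total_distance(p)
--
--     minimum_value_so_far = total_distance
--     for i in range(n):
--         for j in range(i+1, n):
--             old_position_distance = p_distance[i] + p_distance[j]
--             swap(p, i, j)
--             current_position_distance = position_distance(p, i) + position_distance(p, j)
--             current_total_distance = total_distance - old_position_distance + current_position_distance
--             if current_total_distance < minimum_value_so_far:
--                 minimum_value_so_far = current_total_distance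
--             swap(p, i, j)
--     return minimum_value_so_far
-- ===== SOURCE B (Python) =====
-- def solve(p):
--     # Simpler: no p_distance table, no delta update -- recompute the full total per swap.
--     n = len(p)
--
--     def get_distance(q, i):
--         if i >= n:
--             return 0
--         if i - 1 >= 0:
--             return abs(q[i - 1] - q[i])
--         return q[i]
--
--     def total(q):
--         t = 0
--         for k in range(n):
--             t += get_distance(q, k)
--         return t
--
--     best = total(p)
--     for i in range(n):
--         for j in range(i + 1, n):
--             p[i], p[j] = p[j], p[i]
--             t = total(p)
--             if t < best:
--                 best = t
--             p[i], p[j] = p[j], p[i]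
--     return best
-- ===== Notes on version B (the rewrite author's own statement) =====
-- stated objective: simpler
-- what changed: Dropped A's precomputed p_distance table and O(1) overlapping-edge delta update; B just swaps the pair and recomputes the whole total distance, which is shorter and obviously correct.
import Mathlib
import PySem

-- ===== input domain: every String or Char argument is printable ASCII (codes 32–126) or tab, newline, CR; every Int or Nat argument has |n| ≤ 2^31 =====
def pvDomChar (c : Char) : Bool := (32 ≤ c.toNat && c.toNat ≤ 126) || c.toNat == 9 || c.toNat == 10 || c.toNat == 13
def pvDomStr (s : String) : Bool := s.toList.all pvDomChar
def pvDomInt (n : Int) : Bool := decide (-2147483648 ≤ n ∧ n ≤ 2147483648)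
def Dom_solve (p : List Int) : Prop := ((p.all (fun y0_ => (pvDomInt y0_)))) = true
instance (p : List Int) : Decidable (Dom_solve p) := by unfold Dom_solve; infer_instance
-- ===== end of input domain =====

-- B drops A's p_distance table and O(1) delta update and recomputes the full total per swap
-- (objective: simpler).  Both Pythons swap p's elements in place but restore them before
-- returning, so the caller sees no mutation; the equivalence is about the return value.

-- ===== PORT A =====
-- get_distance(p, i): every index reached by the guarded branches is in range, so getD is exact.
def gdist (p : List Int) (i : Nat) : Int :=
  if p.length ≤ i then 0
  else if 1 ≤ i then |p.getD (i - 1) 0 - p.getD i 0|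
  else p.getD i 0

-- position_distance(p, i)
def posDist (p : List Int) (i : Nat) : Int := gdist p i + gdist p (i + 1)

-- swap(p, i, j): the ports work on the swapped copy (Python restores p before the next pair,
-- so every iteration starts from the original list)
def swapL (p : List Int) (i j : Nat) : List Int :=
  (p.set i (p.getD j 0)).set j (p.getD i 0)

def solve (p : List Int) : Int :=
  let n := p.length
  let pDistance := (List.range n).map (fun i => posDist p i)
  -- get_total_distance(p): for-loop over range(n)
  let totalDistance := (List.range n).foldl (fun t k => t + gdist p k) 0
  (List.range n).foldl (fun m i =>
    (List.range' (i + 1) (n - (i + 1))).foldl (fun m j =>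
      let q := swapL p i j
      let cur := totalDistance - (pDistance.getD i 0 + pDistance.getD j 0)
                  + (posDist q i + posDist q j)
      if cur < m then cur else m) m) totalDistance

-- ===== PORT B =====
def solve_alt (p : List Int) : Int :=
  let n := p.length
  let best := (List.range n).foldl (fun t k => t + gdist p k) 0
  (List.range n).foldl (fun m i =>
    (List.range' (i + 1) (n - (i + 1))).foldl (fun m j =>
      let q := swapL p i j
      let t := (List.range n).foldl (fun t k => t + gdist q k) 0
      if t < m then t else m) m) best

-- ===== PRECONDITION & SPEC =====
def Spec_solve (p : List Int) (out : Int) : Prop := out = solve_alt p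
instance (p : List Int) (out : Int) : Decidable (Spec_solve p out) := by unfold Spec_solve; infer_instance

-- ===== CLAIM (what is proved, stated in full; the proofs are below) =====
def Claim_equal_solve : Prop := ∀ (p : List Int), Dom_solve p → Spec_solve p (solve p)

-- ===== LEMMAS AND PROOFS =====

-- contribution of index k, written on an accessor function
def cAt (n : Nat) (h : Nat → Int) (k : Nat) : Int :=
  if n ≤ k then 0
  else if 1 ≤ k then |h (k - 1) - h k|
  else h 0

theorem gdist_eq_cAt (q : List Int) (k : Nat) :
    gdist q k = cAt q.length (fun m => q.getD m 0) k := by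
  unfold gdist cAt
  split_ifs with h1 h2
  · rfl
  · rfl
  · have : k = 0 := by omega
    simp [this]

theorem length_swapL (p : List Int) (i j : Nat) : (swapL p i j).length = p.length := by
  simp [swapL]

theorem getD_swapL (p : List Int) (i j : Nat) (hi : i < p.length) (hj : j < p.length) (k : Nat) :
    (swapL p i j).getD k 0
      = if k = j then p.getD i 0 else if k = i then p.getD j 0 else p.getD k 0 := by
  unfold swapL
  rw [List.getD_eq_getElem?_getD, List.getElem?_set, List.getElem?_set]
  simp only [List.length_set]
  split_ifs <;> subst_vars <;> simp_all [List.getD_eq_getElem?_getD]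

theorem total_eq_sum (n : Nat) (q : List Int) :
    (List.range n).foldl (fun t k => t + gdist q k) 0
      = ∑ k ∈ Finset.range n, gdist q k := by
  induction n with
  | zero => simp
  | succ m ih => rw [List.range_succ, List.foldl_append, Finset.sum_range_succ, ih]; simp

theorem pDistance_getD (p : List Int) (i : Nat) (h : i < p.length) :
    ((List.range p.length).map (fun i => posDist p i)).getD i 0 = posDist p i := by
  rw [List.getD_eq_getElem?_getD]
  simp [h]

-- the key identity: A's O(1) delta update equals B's full recomputation
theorem delta_eq (p : List Int) (i j : Nat) (hij : i < j) (hj : j < p.length) :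
    ∑ k ∈ Finset.range p.length, gdist (swapL p i j) k
      = (∑ k ∈ Finset.range p.length, gdist p k)
        - (posDist p i + posDist p j)
        + (posDist (swapL p i j) i + posDist (swapL p i j) j) := by
  set n := p.length with hn
  set q := swapL p i j with hq
  have hi : i < n := lt_trans hij hj
  have hlen : q.length = n := length_swapL p i j
  set f : Nat → Int := fun m => p.getD m 0 with hf
  set g : Nat → Int := fun m => q.getD m 0 with hg
  have hgf : ∀ k, g k = if k = j then f i else if k = i then f j else f k :=
    fun k => getD_swapL p i j hi hj k
  have hcg : ∀ k, gdist q k = cAt n g k := by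
    intro k; rw [gdist_eq_cAt, hlen]
  have hcf : ∀ k, gdist p k = cAt n f k := fun k => gdist_eq_cAt p k
  set d : Nat → Int := fun k => cAt n g k - cAt n f k with hd
  -- contributions away from i, i+1, j, j+1 are unchanged
  have hd0 : ∀ k, k ≠ i → k ≠ i+1 → k ≠ j → k ≠ j+1 → d k = 0 := by
    intro k h1 h2 h3 h4
    simp only [hd, cAt]
    by_cases hk : n ≤ k
    · simp [hk]
    · by_cases hk1 : 1 ≤ k
      · have e1 : g k = f k := by rw [hgf]; rw [if_neg h3, if_neg h1]
        have e2 : g (k-1) = f (k-1) := by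
          rw [hgf]; rw [if_neg (by omega), if_neg (by omega)]
        simp [hk, hk1, e1, e2]
      · have hk0 : k = 0 := by omega
        subst hk0
        have e : g 0 = f 0 := by rw [hgf]; rw [if_neg h3, if_neg h1]
        simp [hk, e]
  -- the shared edge of an adjacent swap is unchanged (this is why A's delta is correct there)
  have hadj : j = i+1 → d (i+1) = 0 := by
    intro hji
    simp only [hd, cAt]
    have h1n : ¬ n ≤ i+1 := by omega
    have e1 : g (i+1-1) = f j := by
      show g i = f j
      rw [hgf]; rw [if_neg (by omega), if_pos rfl]
    have e2 : g (i+1) = f i := by rw [hgf]; rw [if_pos hji.symm]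
    have e3 : f (i+1-1) = f i := rfl
    simp only [h1n, if_false, e1, e2, e3]
    rw [if_pos (by omega), if_pos (by omega), ← hji, abs_sub_comm]
    ring
  have key : ∑ k ∈ Finset.range n, d k = d i + d (i+1) + d j + d (j+1) := by
    have hsub1 : ∑ k ∈ Finset.range n ∩ ({i, i+1, j, j+1} : Finset ℕ), d k
        = ∑ k ∈ Finset.range n, d k := by
      apply Finset.sum_subset Finset.inter_subset_left
      intro x hx hnx
      have hS : x ∉ ({i, i+1, j, j+1} : Finset ℕ) :=
        fun hs => hnx (Finset.mem_inter.mpr ⟨hx, hs⟩)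
      simp only [Finset.mem_insert, Finset.mem_singleton, not_or] at hS
      exact hd0 x hS.1 hS.2.1 hS.2.2.1 hS.2.2.2
    have hsub2 : ∑ k ∈ Finset.range n ∩ ({i, i+1, j, j+1} : Finset ℕ), d k
        = ∑ k ∈ ({i, i+1, j, j+1} : Finset ℕ), d k := by
      apply Finset.sum_subset Finset.inter_subset_right
      intro x hx hnx
      have hxn : ¬ x < n := fun h =>
        hnx (Finset.mem_inter.mpr ⟨Finset.mem_range.mpr h, hx⟩)
      simp [hd, cAt, show n ≤ x by omega]
    rw [← hsub1, hsub2]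
    by_cases hja : j = i+1
    · subst hja
      rw [show ({i, i+1, i+1, i+1+1} : Finset ℕ) = {i, i+1, i+1+1} by simp]
      rw [Finset.sum_insert (by simp only [Finset.mem_insert, Finset.mem_singleton]; omega),
          Finset.sum_insert (by simp only [Finset.mem_singleton]; omega),
          Finset.sum_singleton]
      have h0 := hadj rfl
      rw [h0]; ring
    · rw [Finset.sum_insert (by simp only [Finset.mem_insert, Finset.mem_singleton]; omega),
          Finset.sum_insert (by simp only [Finset.mem_insert, Finset.mem_singleton]; omega),
          Finset.sum_insert (by simp only [Finset.mem_singleton]; omega),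
          Finset.sum_singleton]
      ring
  have hsplit : ∑ k ∈ Finset.range n, d k
      = (∑ k ∈ Finset.range n, cAt n g k) - (∑ k ∈ Finset.range n, cAt n f k) := by
    simp [hd, Finset.sum_sub_distrib]
  simp only [posDist, hcg, hcf]
  rw [hsplit] at key
  simp only [hd] at key
  linarith

-- ===== VERDICT (by name: the statement is the Claim_ definition above) =====
theorem solve_spec : Claim_equal_solve := by
  intro p _
  unfold Spec_solve solve solve_alt
  refine PySem.List.foldl_congr_mem _ _ _ _ (fun m i hi => ?_)
  rw [List.mem_range] at hi
  refine PySem.List.foldl_congr_mem _ _ _ _ (fun m' j hj => ?_)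
  rw [List.mem_range'] at hj
  have hij : i < j := by omega
  have hjn : j < p.length := by omega
  simp only [total_eq_sum, pDistance_getD p i hi, pDistance_getD p j hjn,
             delta_eq p i j hij hjn]
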